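-- pv_equiv track=rewrite | github.com/strath-ace/smart-dao | sem_analysis/dev/dev-timeline-sem/plot_china_21-05-21.py | add_minutes
-- ===== SOURCE A (Python) =====
-- num_minutes = 1200      # In minutes
--
-- timestep = 15      # In minutes
--
-- def add_minutes(x, minutes_past, label_name):
--     temp = []
--     for i in range(0, num_minutes, timestep):
--         sum = 0
--         for y in range(i, i+timestep):
--             if y in minutes_past:
--                 sum += 1
--         for y in range(i, i+timestep):
--             if sum == 0:
--                 temp.append(0)
--             else:
--                 temp.append(sum)
--     #plt.fill_between(x, temp, label=label_name, step="pre", alpha=0.4)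
--     return temp
-- ===== SOURCE B (Python) =====
-- # B: one-pass histogram over the (deduplicated) minutes, then expand each bucket
-- # count timestep times -- O(n + num_minutes) instead of A's O(num_minutes * n).
-- num_minutes = 1200      # In minutes
--
-- timestep = 15      # In minutes
--
-- def add_minutes(x, minutes_past, label_name):
--     valid = {m for m in minutes_past if 0 <= m < num_minutes}
--     counts = [0] * (num_minutes // timestep)
--     for m in valid:
--         counts[int(m) // timestep] += 1
--     temp = []
--     for c in counts:
--         temp.extend([c] * timestep)
--     return temp
-- ===== Notes on version B (the rewrite author's own statement) =====
-- stated objective: faster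
-- what changed: Instead of scanning every one of the 1200 minutes against the whole list (membership test per minute), B deduplicates the minutes once, builds an 80-bucket histogram in a single pass over the data, and expands each bucket count timestep times.
import Mathlib
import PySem

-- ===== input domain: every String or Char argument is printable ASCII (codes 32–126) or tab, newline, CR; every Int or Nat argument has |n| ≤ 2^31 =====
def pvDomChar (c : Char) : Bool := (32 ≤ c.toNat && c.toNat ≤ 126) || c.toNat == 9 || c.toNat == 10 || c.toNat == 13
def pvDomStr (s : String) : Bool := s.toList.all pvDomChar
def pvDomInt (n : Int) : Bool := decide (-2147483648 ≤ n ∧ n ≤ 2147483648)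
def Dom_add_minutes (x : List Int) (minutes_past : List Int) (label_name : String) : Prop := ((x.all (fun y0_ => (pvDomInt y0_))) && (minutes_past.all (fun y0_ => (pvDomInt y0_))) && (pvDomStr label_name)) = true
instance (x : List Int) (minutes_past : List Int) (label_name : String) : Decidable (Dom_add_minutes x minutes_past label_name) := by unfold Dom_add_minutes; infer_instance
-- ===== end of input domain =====

-- B replaces A's per-minute membership scan by a deduplicated one-pass histogram plus
-- a bucket-expansion pass (measured asymptotically faster); return values are proved equal.

-- ===== PORT A =====
def add_minutes (x : List Int) (minutes_past : List Int) (label_name : String) : List Int :=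
  -- for i in range(0, num_minutes, timestep): …
  (PySem.List.pyRange 0 1200 15).foldl (fun temp i =>
    -- sum = 0; for y in range(i, i+timestep): if y in minutes_past: sum += 1
    let sum : Int := (PySem.List.pyRange i (i + 15) 1).foldl
      (fun s y => if minutes_past.contains y then s + 1 else s) 0
    -- for y in range(i, i+timestep): append 0 if sum == 0 else sum
    (PySem.List.pyRange i (i + 15) 1).foldl
      (fun t _y => if sum = 0 then t ++ [(0 : Int)] else t ++ [sum]) temp) []

-- ===== PORT B =====
def add_minutes_alt (x : List Int) (minutes_past : List Int) (label_name : String) : List Int :=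
  -- valid = {m for m in minutes_past if 0 <= m < num_minutes}
  let valid : PySem.Set Int :=
    PySem.Set.ofList (minutes_past.filter (fun m => decide (0 ≤ m ∧ m < 1200)))
  -- counts = [0]*(num_minutes//timestep); for m in valid: counts[int(m)//timestep] += 1
  let counts : List Int := valid.foldl
    (fun cs m => cs.set (PySem.Int.floordiv m 15).toNat
                        (cs.getD (PySem.Int.floordiv m 15).toNat 0 + 1))
    (List.replicate 80 (0 : Int))
  -- temp = []; for c in counts: temp.extend([c]*timestep)
  counts.foldl (fun t c => t ++ List.replicate 15 c) []

-- ===== PRECONDITION & SPEC =====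
def Spec_add_minutes (x : List Int) (minutes_past : List Int) (label_name : String) (out : List Int) : Prop := out = add_minutes_alt x minutes_past label_name
instance (x : List Int) (minutes_past : List Int) (label_name : String) (out : List Int) : Decidable (Spec_add_minutes x minutes_past label_name out) := by unfold Spec_add_minutes; infer_instance

-- ===== CLAIM (what is proved, stated in full; the proofs are below) =====
def Claim_equal_add_minutes : Prop := ∀ (x : List Int) (minutes_past : List Int) (label_name : String), Dom_add_minutes x minutes_past label_name → Spec_add_minutes x minutes_past label_name (add_minutes x minutes_past label_name)

-- ===== LEMMAS AND PROOFS =====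

-- the histogram update of B's middle loop
def pvUpd (cs : List Int) (m : Int) : List Int :=
  cs.set (PySem.Int.floordiv m 15).toNat (cs.getD (PySem.Int.floordiv m 15).toNat 0 + 1)

lemma pvUpd_length (cs : List Int) (m : Int) : (pvUpd cs m).length = cs.length := by
  simp [pvUpd]

lemma pvFoldl_upd_length (l : List Int) (cs : List Int) :
    (l.foldl pvUpd cs).length = cs.length := by
  induction l generalizing cs with
  | nil => rfl
  | cons a l ih => simp [List.foldl_cons, ih, pvUpd_length]

-- histogram invariant: each cell counts the elements falling into its bucket
lemma pvSet_getD_self (cs : List Int) (n : Nat) (hn : n < cs.length) (v : Int) :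
    (cs.set n v).getD n 0 = v := by
  rw [List.getD_eq_getElem?_getD, List.getElem?_set_self', List.getElem?_eq_getElem hn]; simp

lemma pvSet_getD_ne (cs : List Int) (n k : Nat) (h : ¬ n = k) (v : Int) :
    (cs.set n v).getD k 0 = cs.getD k 0 := by
  rw [List.getD_eq_getElem?_getD, List.getElem?_set_ne h, ← List.getD_eq_getElem?_getD]

-- histogram invariant: each cell counts the elements falling into its bucket
lemma pvFoldl_upd_getD (l : List Int) (cs : List Int)
    (hl : ∀ m ∈ l, (PySem.Int.floordiv m 15).toNat < cs.length) (k : Nat) :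
    (l.foldl pvUpd cs).getD k 0
      = cs.getD k 0 + (l.countP (fun m => (PySem.Int.floordiv m 15).toNat == k) : Int) := by
  induction l generalizing cs with
  | nil => simp
  | cons a l ih =>
    have ha := hl a (by simp)
    rw [List.foldl_cons, ih (pvUpd cs a)
        (fun m hm => by rw [pvUpd_length]; exact hl m (by simp [hm])), List.countP_cons]
    by_cases hk : (PySem.Int.floordiv a 15).toNat = k
    · subst hk
      unfold pvUpd
      rw [pvSet_getD_self _ _ ha]
      simp only [beq_self_eq_true, if_pos]
      push_cast
      ring
    · unfold pvUpd
      rw [pvSet_getD_ne _ _ _ hk]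
      have : ((PySem.Int.floordiv a 15).toNat == k) = false := by
        simpa using hk
      rw [this]
      simp

-- counting distinct common elements is symmetric between two nodup lists
lemma pvCountP_mem_comm (l₁ l₂ : List Int) (h₁ : l₁.Nodup) (h₂ : l₂.Nodup) :
    l₁.countP (fun y => decide (y ∈ l₂)) = l₂.countP (fun y => decide (y ∈ l₁)) := by
  rw [List.countP_eq_length_filter, List.countP_eq_length_filter]
  rw [← List.toFinset_card_of_nodup (h₁.filter _),
      ← List.toFinset_card_of_nodup (h₂.filter _)]
  rw [List.toFinset_filter, List.toFinset_filter]
  simp only [decide_eq_true_eq, ← List.mem_toFinset]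
  rw [Finset.filter_mem_eq_inter, Finset.filter_mem_eq_inter, Finset.inter_comm]

-- the inner minute range of window k, as a concrete map over List.range
lemma pvInner_range (i : Int) :
    PySem.List.pyRange i (i + 15) 1 = (List.range 15).map (fun j : Nat => i + (j : Int)) := by
  rw [PySem.List.pyRange_of_pos _ _ (by norm_num)]
  rw [if_pos (by omega)]
  have h15 : ((i + 15 - i + 1 - 1) / 1).toNat = 15 := by omega
  rw [h15]
  exact List.map_congr_left (fun a _ => by ring)

lemma pvInner_nodup (i : Int) : (PySem.List.pyRange i (i + 15) 1).Nodup := by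
  rw [pvInner_range]
  exact List.Nodup.map_on (by intro a _ b _ h; omega) List.nodup_range

lemma pvInner_mem (i y : Int) : y ∈ PySem.List.pyRange i (i + 15) 1 ↔ i ≤ y ∧ y < i + 15 := by
  rw [pvInner_range]
  simp only [List.mem_map, List.mem_range]
  constructor
  · rintro ⟨j, hj, rfl⟩; omega
  · rintro ⟨h1, h2⟩
    exact ⟨(y - i).toNat, by omega, by omega⟩

lemma pvInner_length (i : Int) : (PySem.List.pyRange i (i + 15) 1).length = 15 := by
  rw [pvInner_range]; simp

-- A's window sum equals B's histogram cell, for each window k < 80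
lemma pvWindow_eq (mp : List Int) (k : Nat) (hk : k < 80) :
    ((PySem.List.pyRange (15 * (k : Int)) (15 * (k : Int) + 15) 1).countP
        (fun y => mp.contains y) : Int)
      = ((PySem.Set.ofList (mp.filter (fun m => decide (0 ≤ m ∧ m < 1200)))).countP
          (fun m => (PySem.Int.floordiv m 15).toNat == k) : Int) := by
  set d := PySem.Set.ofList (mp.filter (fun m => decide (0 ≤ m ∧ m < 1200))) with hd
  have hdmem : ∀ m, m ∈ d ↔ m ∈ mp ∧ (0 ≤ m ∧ m < 1200) := by
    intro m
    rw [hd, PySem.Set.mem_ofList, List.mem_filter]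
    simp
  have hdnodup : d.Nodup := PySem.Set.nodup_ofList _
  -- replace the membership test by membership in d
  have h1 : (PySem.List.pyRange (15 * (k : Int)) (15 * (k : Int) + 15) 1).countP
      (fun y => mp.contains y)
      = (PySem.List.pyRange (15 * (k : Int)) (15 * (k : Int) + 15) 1).countP
        (fun y => decide (y ∈ d)) := by
    apply List.countP_congr
    intro y hy
    rw [pvInner_mem] at hy
    simp only [List.contains_iff_mem, decide_eq_true_eq, hdmem y]
    constructor
    · intro h; exact ⟨h, by omega⟩
    · intro h; exact h.1
  rw [h1, pvCountP_mem_comm _ _ (pvInner_nodup _) hdnodup]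
  congr 1
  apply List.countP_congr
  intro m hm
  have hmd := (hdmem m).1 hm
  have hfd : PySem.Int.floordiv m 15 = m / 15 :=
    PySem.Int.floordiv_eq_ediv_of_pos (by norm_num)
  simp only [decide_eq_true_eq, pvInner_mem, beq_iff_eq, hfd]
  omega

-- the third Python loop appends the (constant) window sum 15 times
lemma pvAppend_const (l : List Int) (temp : List Int) (s : Int) :
    l.foldl (fun t (_y : Int) => if s = 0 then t ++ [(0 : Int)] else t ++ [s]) temp
      = temp ++ List.replicate l.length s := by
  have hbranch : (fun (t : List Int) (_y : Int) => if s = 0 then t ++ [(0 : Int)] else t ++ [s])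
      = fun t _y => t ++ [s] := by
    funext t y
    by_cases h : s = 0 <;> simp [h]
  rw [hbranch, PySem.List.foldl_append_singleton_eq_map (fun (_ : Int) => s) l temp]
  simp [List.map_const']

lemma pvA_eq (mp : List Int) (temp : List Int) (i : Int) :
    (PySem.List.pyRange i (i + 15) 1).foldl
      (fun t _y => if ((PySem.List.pyRange i (i + 15) 1).foldl
          (fun (s : Int) y => if mp.contains y then s + 1 else s) (0 : Int)) = 0
        then t ++ [(0 : Int)]
        else t ++ [((PySem.List.pyRange i (i + 15) 1).foldl
          (fun (s : Int) y => if mp.contains y then s + 1 else s) (0 : Int))]) temp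
      = temp ++ List.replicate 15
          (((PySem.List.pyRange i (i + 15) 1).countP (fun y => mp.contains y) : Int)) := by
  generalize hS : (PySem.List.pyRange i (i + 15) 1).foldl
      (fun (s : Int) y => if mp.contains y then s + 1 else s) (0 : Int) = S
  rw [pvAppend_const, pvInner_length, ← hS, PySem.List.foldl_count_if, zero_add]

-- ===== VERDICT (by name: the statement is the Claim_ definition above) =====
theorem add_minutes_spec : Claim_equal_add_minutes := by
  intro x mp label _
  unfold Spec_add_minutes add_minutes add_minutes_alt
  dsimp only
  set d := PySem.Set.ofList (mp.filter (fun m => decide (0 ≤ m ∧ m < 1200))) with hd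
  have hdran : ∀ m ∈ d, (PySem.Int.floordiv m 15).toNat < (List.replicate 80 (0 : Int)).length := by
    intro m hm
    rw [hd, PySem.Set.mem_ofList, List.mem_filter] at hm
    have h2 := hm.2
    simp only [decide_eq_true_eq] at h2
    have hfd : PySem.Int.floordiv m 15 = m / 15 :=
      PySem.Int.floordiv_eq_ediv_of_pos (by norm_num)
    simp only [List.length_replicate, hfd]
    omega
  rw [show (fun (cs : List Int) (m : Int) =>
        cs.set (PySem.Int.floordiv m 15).toNat (cs.getD (PySem.Int.floordiv m 15).toNat 0 + 1))
      = pvUpd from rfl]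
  have hcounts : d.foldl pvUpd (List.replicate 80 (0 : Int))
      = (List.range 80).map
          (fun k => (d.countP (fun m => (PySem.Int.floordiv m 15).toNat == k) : Int)) := by
    apply List.ext_getElem
    · rw [pvFoldl_upd_length]; simp
    · intro k hk1 hk2
      have hk : k < 80 := by simpa using hk2
      have h := pvFoldl_upd_getD d (List.replicate 80 (0 : Int)) hdran k
      rw [List.getD_eq_getElem _ _ hk1, List.getD_eq_getElem _ _ (by simp [hk])] at h
      rw [h, List.getElem_replicate, List.getElem_map, List.getElem_range]
      simp
  rw [hcounts]
  rw [show PySem.List.pyRange 0 1200 15 = (List.range 80).map (fun k : Nat => 15 * (k : Int)) by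
    rw [PySem.List.pyRange_of_pos _ _ (by norm_num)]
    rw [if_pos (by omega)]
    have h80 : (((1200 : Int) - 0 + 15 - 1) / 15).toNat = 80 := by decide
    rw [h80]
    exact List.map_congr_left (fun a _ => by ring)]
  rw [List.foldl_map, List.foldl_map]
  apply PySem.List.foldl_congr_mem
  intro acc k hk
  rw [List.mem_range] at hk
  dsimp only
  rw [pvA_eq mp acc (15 * (k : Int)), pvWindow_eq mp k hk]
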